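-- pv_equiv track=rewrite | github.com/ddideu/ddideu | 알고리즘 문제/2023-08-12/부녀회장.py | Find
-- ===== SOURCE A (Python) =====
-- def Find(k, n):
--     apt = []
--     for i in range(k+1):
--         # 임시 리스트 생성
--         Temp = [0] * (n + 1)
--         # i+1만큼 반복
--         for j in range(n+1):
--             # 만약 i 가 0 혹은 j라면
--             if i == 0:
--                 Temp[j] += j
--                 # 리스트에 j추가
--             # 아니라면
--             else:
--                 for m in range(j+1):
--                     Temp[j] += apt[i-1][m]
--         apt.append(Temp)
--     return apt[k][n]
-- ===== SOURCE B (Python) =====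
-- def Find(k, n):
--     # Running prefix sum per row: row i+1 is the prefix-sum scan of row i.
--     row = list(range(n + 1))
--     for _ in range(k):
--         acc = 0
--         new = []
--         for x in row:
--             acc += x
--             new.append(acc)
--         row = new
--     return row[n]
-- ===== Notes on version B (the rewrite author's own statement) =====
-- stated objective: faster
-- what changed: Each new row is produced by one running prefix-sum scan of the previous row instead of re-summing prev[0..j] from scratch for every cell, and only the current row is kept.
import Mathlib
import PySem

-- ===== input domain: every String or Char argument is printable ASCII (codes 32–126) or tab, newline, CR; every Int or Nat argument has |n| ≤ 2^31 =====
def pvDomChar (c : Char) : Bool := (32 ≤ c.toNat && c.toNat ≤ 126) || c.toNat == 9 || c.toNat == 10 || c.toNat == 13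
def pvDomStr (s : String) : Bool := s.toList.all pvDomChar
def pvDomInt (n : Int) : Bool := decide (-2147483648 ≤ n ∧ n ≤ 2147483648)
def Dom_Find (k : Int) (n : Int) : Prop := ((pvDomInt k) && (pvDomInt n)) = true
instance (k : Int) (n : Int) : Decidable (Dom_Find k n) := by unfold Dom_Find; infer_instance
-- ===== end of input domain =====

-- B builds each new row by one running prefix-sum scan of the previous row instead of
-- re-summing prev[0..j] from scratch for every cell, keeping only the current row.

-- ===== PORT A =====
def Find (k : Int) (n : Int) : Int :=
  let apt : List (List Int) :=
    (PySem.List.pyRange 0 (k+1) 1).foldl (fun apt i =>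
      let temp : List Int :=
        (PySem.List.pyRange 0 (n+1) 1).foldl (fun temp j =>
          if i = 0 then
            PySem.List.pySetD temp j (PySem.List.pyGetD temp j 0 + j)
          else
            (PySem.List.pyRange 0 (j+1) 1).foldl (fun temp m =>
              PySem.List.pySetD temp j (PySem.List.pyGetD temp j 0 +
                PySem.List.pyGetD (PySem.List.pyGetD apt (i-1) []) m 0)) temp)
          (List.replicate (n+1).toNat 0)
      apt ++ [temp]) []
  PySem.List.pyGetD (PySem.List.pyGetD apt k []) n 0

-- ===== PORT B =====
def Find_alt (k : Int) (n : Int) : Int :=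
  let row0 : List Int := PySem.List.pyRange 0 (n+1) 1
  let row : List Int :=
    (PySem.List.pyRange 0 k 1).foldl (fun row _ =>
      (row.foldl (fun (p : Int × List Int) x => (p.1 + x, p.2 ++ [p.1 + x]))
        ((0 : Int), ([] : List Int))).2) row0
  PySem.List.pyGetD row n 0

-- ===== PRECONDITION & SPEC =====
-- A raises IndexError when k < 0 (apt[k] with fewer rows than needed) or n < 0 (Temp/row empty).
def Pre_Find (k : Int) (n : Int) : Prop := 0 ≤ k ∧ 0 ≤ n
instance (k : Int) (n : Int) : Decidable (Pre_Find k n) := by unfold Pre_Find; infer_instance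
def pvWitness_Find : Int × Int := (3, 4)

def Spec_Find (k : Int) (n : Int) (out : Int) : Prop := out = Find_alt k n
instance (k : Int) (n : Int) (out : Int) : Decidable (Spec_Find k n out) := by unfold Spec_Find; infer_instance

-- ===== CLAIM (what is proved, stated in full; the proofs are below) =====
def Claim_equal_Find : Prop := ∀ (k : Int) (n : Int), Dom_Find k n → Pre_Find k n → Spec_Find k n (Find k n)

-- ===== LEMMAS AND PROOFS =====

-- Shared mathematical description: row 0 is [0,1,…,N]; each next row is the
-- prefix-sum table of the previous one; both programs compute iterRow N K.
def rowF (prev : List Int) (j : Nat) : Int :=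
  ((List.range (j+1)).map (fun m => prev.getD m 0)).sum
def rowStep (N : Nat) (prev : List Int) : List Int :=
  (List.range (N+1)).map (rowF prev)
def baseRow (N : Nat) : List Int := (List.range (N+1)).map (fun j : Nat => (j : Int))
def iterRow (N : Nat) : Nat → List Int
  | 0 => baseRow N
  | t+1 => rowStep N (iterRow N t)

-- A's innermost (m-)loop: repeatedly bumping Temp[J] adds the whole partial sum at once.
theorem mloop (prev : List Int) (J : Nat) : ∀ (ms : Nat) (temp : List Int),
    (List.range ms).foldl (fun t m => t.set J (t.getD J 0 + prev.getD m 0)) temp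
      = temp.set J (temp.getD J 0 + ((List.range ms).map (fun m => prev.getD m 0)).sum) := by
  intro ms
  induction ms with
  | zero =>
    intro temp
    by_cases hJ : J < temp.length
    · simp [hJ, List.set_getElem_self]
    · simp [List.set_eq_of_length_le (le_of_not_gt hJ)]
  | succ s ih =>
    intro temp
    rw [List.range_succ, List.foldl_append, ih]
    by_cases hJ : J < temp.length
    · simp [List.getD_eq_getElem?_getD, List.getElem?_set_self (by simpa using hJ), add_assoc]
    · have h := le_of_not_gt hJ
      simp [List.set_eq_of_length_le (by simpa using h)]

-- A's middle (j-)loop: filling the zero row cell by cell yields the mapped table.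
theorem jloopGen (f : Nat → Int) : ∀ (t N : Nat), t ≤ N+1 →
    (List.range t).foldl (fun temp j => temp.set j (temp.getD j 0 + f j)) (List.replicate (N+1) 0)
      = (List.range t).map f ++ List.replicate (N+1-t) 0 := by
  intro t
  induction t with
  | zero => intro N _; simp
  | succ s ih =>
    intro N h
    rw [List.range_succ, List.foldl_append, ih N (by omega), List.foldl_cons, List.foldl_nil,
        List.map_append]
    have hrep : List.replicate (N+1-s) (0:Int) = 0 :: List.replicate (N-s) 0 := by
      rw [← List.replicate_succ]; congr 1; omega
    have hlen : ((List.range s).map f).length = s := by simp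
    rw [hrep, List.getD_append_right _ _ _ _ (by omega),
        List.set_append_right _ _ (by omega)]
    simp [hlen]

theorem pyRange_zero_cast (b : Nat) :
    PySem.List.pyRange 0 (b : Int) 1 = (List.range b).map (fun j : Nat => (j : Int)) := by
  rw [PySem.List.pyRange_one]
  simp only [sub_zero, Int.toNat_natCast, zero_add]

theorem length_iterRow (N K : Nat) : (iterRow N K).length = N+1 := by
  cases K <;> simp [iterRow, baseRow, rowStep]

-- the inner (j-)loop of A, at outer index i, over the rows built so far
def tempOf (n : Int) (apt : List (List Int)) (i : Int) : List Int :=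
  (PySem.List.pyRange 0 (n+1) 1).foldl (fun temp j =>
    if i = 0 then
      PySem.List.pySetD temp j (PySem.List.pyGetD temp j 0 + j)
    else
      (PySem.List.pyRange 0 (j+1) 1).foldl (fun temp m =>
        PySem.List.pySetD temp j (PySem.List.pyGetD temp j 0 +
          PySem.List.pyGetD (PySem.List.pyGetD apt (i-1) []) m 0)) temp)
    (List.replicate (n+1).toNat 0)

theorem tempOf_eq (N : Nat) (apt : List (List Int)) (t : Nat)
    (hprev : ∀ s : Nat, t = s + 1 → PySem.List.pyGetD apt (s : Int) [] = iterRow N s) :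
    tempOf (N : Int) apt (t : Int) = iterRow N t := by
  unfold tempOf
  have hN1 : ((N : Int) + 1) = ((N+1 : Nat) : Int) := by push_cast; ring
  rw [hN1, pyRange_zero_cast, List.foldl_map, Int.toNat_natCast]
  cases t with
  | zero =>
    have hbody : (fun (temp : List Int) (j : Nat) =>
        if ((0:Nat) : Int) = 0 then
          PySem.List.pySetD temp (j : Int) (PySem.List.pyGetD temp (j : Int) 0 + (j : Int))
        else
          (PySem.List.pyRange 0 ((j:Int)+1) 1).foldl (fun temp m =>
            PySem.List.pySetD temp (j:Int) (PySem.List.pyGetD temp (j:Int) 0 +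
              PySem.List.pyGetD (PySem.List.pyGetD apt (((0:Nat):Int)-1) []) m 0)) temp)
        = fun (temp : List Int) (j : Nat) => temp.set j (temp.getD j 0 + (j : Int)) := by
      funext temp j
      simp
    rw [hbody, jloopGen (fun j : Nat => (j : Int)) (N+1) N (le_refl _)]
    simp [iterRow, baseRow]
  | succ s =>
    have hp := hprev s rfl
    have hbody : (fun (temp : List Int) (j : Nat) =>
        if ((s+1:Nat) : Int) = 0 then
          PySem.List.pySetD temp (j : Int) (PySem.List.pyGetD temp (j : Int) 0 + (j : Int))
        else
          (PySem.List.pyRange 0 ((j:Int)+1) 1).foldl (fun temp m =>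
            PySem.List.pySetD temp (j:Int) (PySem.List.pyGetD temp (j:Int) 0 +
              PySem.List.pyGetD (PySem.List.pyGetD apt (((s+1:Nat):Int)-1) []) m 0)) temp)
        = fun (temp : List Int) (j : Nat) => temp.set j (temp.getD j 0 + rowF (iterRow N s) j) := by
      funext temp j
      have hne : ((s+1:Nat) : Int) ≠ 0 := by push_cast; omega
      rw [if_neg hne]
      have hcast : ((s+1:Nat) : Int) - 1 = (s : Int) := by push_cast; ring
      rw [hcast, hp]
      have hj1 : ((j:Int)+1) = ((j+1 : Nat) : Int) := by push_cast; ring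
      rw [hj1, pyRange_zero_cast, List.foldl_map]
      have hmb : (fun (temp : List Int) (m : Nat) =>
          PySem.List.pySetD temp (j:Int) (PySem.List.pyGetD temp (j:Int) 0 +
            PySem.List.pyGetD (iterRow N s) (m:Int) 0))
          = fun (temp : List Int) (m : Nat) => temp.set j (temp.getD j 0 + (iterRow N s).getD m 0) := by
        funext temp m
        simp
      rw [hmb, mloop]
      rfl
    rw [hbody, jloopGen (rowF (iterRow N s)) (N+1) N (le_refl _)]
    simp [iterRow, rowStep]

-- A's outer (i-)loop: apt is exactly the table of the first t rows.
theorem aOuter (N : Nat) : ∀ (t : Nat),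
    (List.range t).foldl (fun apt (i : Nat) => apt ++ [tempOf (N : Int) apt (i : Int)]) []
      = (List.range t).map (iterRow N) := by
  intro t
  induction t with
  | zero => simp
  | succ s ih =>
    rw [List.range_succ, List.foldl_append, ih, List.foldl_cons, List.foldl_nil,
        List.map_append]
    congr 1
    have hT := tempOf_eq N ((List.range s).map (iterRow N)) s (by
      intro u hu
      subst hu
      rw [PySem.List.pyGetD_natCast]
      rw [List.getD_eq_getElem _ _ (by simp)]
      simp)
    rw [hT]
    simp

-- B's one-row scan step
def stepB (row : List Int) : List Int :=
  (row.foldl (fun (p : Int × List Int) x => (p.1 + x, p.2 ++ [p.1 + x]))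
    ((0 : Int), ([] : List Int))).2

-- B's inner scan: the running accumulator produces exactly the prefix sums.
theorem scan2 : ∀ (row : List Int) (acc : Int) (out : List Int),
    (row.foldl (fun (p : Int × List Int) x => (p.1 + x, p.2 ++ [p.1 + x])) (acc, out)).2
      = out ++ (List.range row.length).map (fun j => acc + ((List.range (j+1)).map (fun m => row.getD m 0)).sum) := by
  intro row
  induction row with
  | nil => intro acc out; simp
  | cons x xs ih =>
    intro acc out
    rw [List.foldl_cons, ih]
    rw [List.length_cons, List.range_succ_eq_map, List.map_cons, List.map_map]
    have h0 : acc + ((List.range (0+1)).map (fun m => (x::xs).getD m 0)).sum = acc + x := by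
      simp
    have hstep : ((fun j => acc + ((List.range (j+1)).map (fun m => (x::xs).getD m 0)).sum) ∘ Nat.succ)
          = fun j => acc + x + ((List.range (j+1)).map (fun m => xs.getD m 0)).sum := by
      funext j
      simp only [Function.comp]
      rw [Nat.succ_eq_add_one, show List.range (j+1+1) = 0 :: (List.range (j+1)).map Nat.succ from List.range_succ_eq_map, List.map_cons, List.map_map]
      have : ((List.range (j+1)).map ((fun m => (x::xs).getD m 0) ∘ Nat.succ))
           = (List.range (j+1)).map (fun m => xs.getD m 0) := by
        apply List.map_congr_left; intro m _; simp
      rw [this]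
      simp [add_assoc]
    rw [h0, hstep]
    simp

theorem foldl_const_iter {α β : Type} (l : List α) (g : β → β) (init : β) :
    l.foldl (fun r _ => g r) init = g^[l.length] init := by
  induction l generalizing init with
  | nil => simp
  | cons x xs ih => simp [ih, Function.iterate_succ_apply]

theorem stepB_eq (N : Nat) (row : List Int) (h : row.length = N+1) :
    stepB row = rowStep N row := by
  unfold stepB rowStep
  rw [scan2, h]
  simp [rowF]

theorem iterB (N : Nat) : ∀ K, stepB^[K] (baseRow N) = iterRow N K := by
  intro K
  induction K with
  | zero => rfl
  | succ s ih =>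
    rw [Function.iterate_succ_apply', ih, stepB_eq N _ (length_iterRow N s)]
    rfl

theorem getD_iter (N K : Nat) (xs : List (List Int)) (h : xs = (List.range (K+1)).map (iterRow N)) :
    PySem.List.pyGetD (PySem.List.pyGetD xs (K : Int) []) (N : Int) 0
      = (iterRow N K).getD N 0 := by
  subst h
  rw [PySem.List.pyGetD_natCast, PySem.List.pyGetD_natCast]
  have h1 : ((List.range (K+1)).map (iterRow N)).getD K [] = iterRow N K := by
    rw [List.getD_eq_getElem _ _ (by simp)]
    simp
  rw [h1]

theorem Find_eq (K N : Nat) : Find (K : Int) (N : Int) = (iterRow N K).getD N 0 := by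
  show PySem.List.pyGetD (PySem.List.pyGetD
      ((PySem.List.pyRange 0 ((K:Int)+1) 1).foldl
        (fun apt i => apt ++ [tempOf (N : Int) apt i]) []) (K : Int) []) (N : Int) 0
    = (iterRow N K).getD N 0
  have hK1 : ((K : Int) + 1) = ((K+1 : Nat) : Int) := by push_cast; ring
  rw [hK1, pyRange_zero_cast, List.foldl_map, aOuter N (K+1)]
  exact getD_iter N K _ rfl

theorem Find_alt_eq (K N : Nat) : Find_alt (K : Int) (N : Int) = (iterRow N K).getD N 0 := by
  show PySem.List.pyGetD
      ((PySem.List.pyRange 0 (K : Int) 1).foldl (fun row _ => stepB row)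
        (PySem.List.pyRange 0 ((N:Int)+1) 1)) (N : Int) 0
    = (iterRow N K).getD N 0
  have hN1 : ((N : Int) + 1) = ((N+1 : Nat) : Int) := by push_cast; ring
  rw [hN1, pyRange_zero_cast (N+1), foldl_const_iter, pyRange_zero_cast K]
  rw [List.length_map, List.length_range]
  rw [show ((List.range (N+1)).map (fun j : Nat => (j:Int))) = baseRow N from rfl, iterB]
  rw [PySem.List.pyGetD_natCast]

-- ===== VERDICT (by name: the statement is the Claim_ definition above) =====
theorem Find_spec : Claim_equal_Find := by
  intro k n _ hpre
  obtain ⟨hk, hn⟩ := hpre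
  unfold Spec_Find
  obtain ⟨K, rfl⟩ := Int.eq_ofNat_of_zero_le hk
  obtain ⟨N, rfl⟩ := Int.eq_ofNat_of_zero_le hn
  rw [Find_eq, Find_alt_eq]
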